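-- pv_equiv track=rewrite | github.com/anderrh/pentatris | tools/generate_pentominoes.py | get_4_rotations
-- ===== SOURCE A (Python) =====
-- def rotate_90cw(cells):
--     """Rotate cells 90 degrees clockwise and normalize to (0,0) origin.
--
--     Transform: (r, c) -> (c, max_r - r), then shift so min is (0,0).
--     """
--     max_r = max(r for r, c in cells)
--     rotated = [(c, max_r - r) for r, c in cells]
--     min_r = min(r for r, c in rotated)
--     min_c = min(c for r, c in rotated)
--     return tuple(sorted((r - min_r, c - min_c) for r, c in rotated))
--
-- def get_4_rotations(cells):
--     """Return list of 4 rotations (0, 90, 180, 270 degrees CW).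
--
--     Symmetric pieces will have duplicate entries, which is intentional -
--     the game uses piece*4+rotation indexing and expects exactly 4 slots.
--     """
--     cells = tuple(sorted(cells))
--     rotations = [cells]
--     current = cells
--     for _ in range(3):
--         current = rotate_90cw(current)
--         rotations.append(current)
--     return rotations
-- ===== SOURCE B (Python) =====
-- def _normalize(pts):
--     """Shift pts so the min row/col is 0, return sorted tuple."""
--     min_r = min(r for r, _ in pts)
--     min_c = min(c for _, c in pts)
--     return tuple(sorted((r - min_r, c - min_c) for r, c in pts))
--
-- def get_4_rotations(cells):
--     """Return list of 4 rotations (0, 90, 180, 270 degrees CW)."""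
--     base = tuple(sorted(cells))
--     return [base,
--             _normalize([(c, -r) for r, c in cells]),
--             _normalize([(-r, -c) for r, c in cells]),
--             _normalize([(-c, r) for r, c in cells])]
-- ===== Notes on version B (the rewrite author's own statement) =====
-- stated objective: alternative
-- what changed: B drops the iterated rotate_90cw loop (sort, then three rotate-and-renormalize passes each re-sorting the previous result) and instead applies each of the three fixed linear rotation maps (c,-r), (-r,-c), (-c,r) directly to the original cells, normalizing and sorting each once; rotation 0 stays the plain sorted tuple.
-- outside the precondition, e.g. on get_4_rotations([]): A raises ValueError, B raises ValueError
import Mathlib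
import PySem

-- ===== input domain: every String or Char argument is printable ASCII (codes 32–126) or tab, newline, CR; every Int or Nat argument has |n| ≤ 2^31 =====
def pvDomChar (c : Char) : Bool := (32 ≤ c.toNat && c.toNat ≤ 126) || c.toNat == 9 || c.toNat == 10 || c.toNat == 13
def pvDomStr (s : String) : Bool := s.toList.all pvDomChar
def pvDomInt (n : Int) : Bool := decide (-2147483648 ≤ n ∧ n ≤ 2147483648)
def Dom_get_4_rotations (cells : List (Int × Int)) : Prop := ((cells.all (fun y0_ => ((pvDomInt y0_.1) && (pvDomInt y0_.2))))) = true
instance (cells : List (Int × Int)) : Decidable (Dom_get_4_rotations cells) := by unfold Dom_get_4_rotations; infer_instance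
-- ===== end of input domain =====

-- B replaces A's loop of three rotate-and-renormalize passes by applying each fixed linear
-- rotation map directly to the input cells and normalizing once per rotation (alternative decomposition).

-- ===== PORT A =====
-- max()/min() of an empty sequence raise ValueError in Python; Pre_ excludes the empty list,
-- so the `.getD 0` defaults are never reached on claimed inputs.
def rotate_90cw (cells : List (Int × Int)) : List (Int × Int) :=
  let max_r : Int := (PySem.List.max? (cells.map (fun p => p.1)) (fun x => x)).getD 0
  let rotated : List (Int × Int) := cells.map (fun p => (p.2, max_r - p.1))
  let min_r : Int := (PySem.List.min? (rotated.map (fun p => p.1)) (fun x => x)).getD 0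
  let min_c : Int := (PySem.List.min? (rotated.map (fun p => p.2)) (fun x => x)).getD 0
  PySem.List.sorted2 (rotated.map (fun p => (p.1 - min_r, p.2 - min_c))) (fun p => p.1) (fun p => p.2)

def get_4_rotations (cells : List (Int × Int)) : List (List (Int × Int)) :=
  let cells2 := PySem.List.sorted2 cells (fun p => p.1) (fun p => p.2)
  let st := (PySem.List.pyRange 0 3 1).foldl
    (fun (st : List (List (Int × Int)) × List (Int × Int)) _ =>
      let current := rotate_90cw st.2
      (st.1 ++ [current], current))
    ([cells2], cells2)
  st.1

-- ===== PORT B =====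
def pvNormalize (pts : List (Int × Int)) : List (Int × Int) :=
  let min_r : Int := (PySem.List.min? (pts.map (fun p => p.1)) (fun x => x)).getD 0
  let min_c : Int := (PySem.List.min? (pts.map (fun p => p.2)) (fun x => x)).getD 0
  PySem.List.sorted2 (pts.map (fun p => (p.1 - min_r, p.2 - min_c))) (fun p => p.1) (fun p => p.2)

def get_4_rotations_alt (cells : List (Int × Int)) : List (List (Int × Int)) :=
  let base := PySem.List.sorted2 cells (fun p => p.1) (fun p => p.2)
  [base,
   pvNormalize (cells.map (fun p => (p.2, -p.1))),
   pvNormalize (cells.map (fun p => (-p.1, -p.2))),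
   pvNormalize (cells.map (fun p => (-p.2, p.1)))]

-- ===== PRECONDITION & SPEC =====
-- Pre_ excludes only the empty list, on which Python A raises ValueError (max() of an empty sequence).
def Pre_get_4_rotations (cells : List (Int × Int)) : Prop := cells ≠ []
instance (cells : List (Int × Int)) : Decidable (Pre_get_4_rotations cells) := by unfold Pre_get_4_rotations; infer_instance
def pvWitness_get_4_rotations : (List (Int × Int)) := ([(0, 0), (0, 1), (1, 1)])

def Spec_get_4_rotations (cells : List (Int × Int)) (out : List (List (Int × Int))) : Prop := out = get_4_rotations_alt cells
instance (cells : List (Int × Int)) (out : List (List (Int × Int))) : Decidable (Spec_get_4_rotations cells out) := by unfold Spec_get_4_rotations; infer_instance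

-- ===== CLAIM (what is proved, stated in full; the proofs are below) =====
def Claim_equal_get_4_rotations : Prop := ∀ (cells : List (Int × Int)), Dom_get_4_rotations cells → Pre_get_4_rotations cells → Spec_get_4_rotations cells (get_4_rotations cells)

-- ===== LEMMAS AND PROOFS =====

-- the tuple comparison of sorted2 is the lexicographic order on Int ×ₗ Int
theorem pv_before (a b : Int × Int) :
    (decide (a.1 < b.1) || !decide (b.1 < a.1) && decide (a.2 < b.2))
      = decide ((toLex a : Int ×ₗ Int) < toLex b) := by
  rw [Bool.eq_iff_iff]
  simp only [Bool.or_eq_true, Bool.and_eq_true, Bool.not_eq_true', decide_eq_true_iff,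
    decide_eq_false_iff_not, Prod.Lex.lt_iff]
  constructor
  · rintro (h | ⟨h1, h2⟩)
    · exact Or.inl h
    · rcases lt_or_eq_of_le (not_lt.mp h1) with h | h
      · exact Or.inl h
      · exact Or.inr ⟨h, h2⟩
  · rintro (h | ⟨h1, h2⟩)
    · exact Or.inl h
    · have h1' : a.1 = b.1 := h1
      have h2' : a.2 < b.2 := h2
      exact Or.inr ⟨not_lt.mpr h1'.le, h2'⟩

theorem pv_s2s (xs : List (Int × Int)) :
    PySem.List.sorted2 xs (fun p => p.1) (fun p => p.2)
      = PySem.List.sorted xs (fun p => (toLex p : Int ×ₗ Int)) false := by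
  rw [PySem.List.sorted_eq_foldl_insertBy]
  show List.foldl (fun acc x => PySem.List.insertBy
      (fun a b => decide (a.1 < b.1) || !decide (b.1 < a.1) && decide (a.2 < b.2)) x acc) [] xs = _
  simp only [pv_before]

theorem pv_foldlMinShift (t' : Int) (ys : List Int) : ∀ x : Int,
    (ys.map (fun v => v + t')).foldl min (x + t') = ys.foldl min x + t' := by
  induction ys with
  | nil => intro x; rfl
  | cons y t ih =>
    intro x
    simp only [List.map_cons, List.foldl_cons]
    rw [min_add_add_right]
    exact ih _

theorem pv_minShift (l : List Int) (t : Int) :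
    PySem.List.min? (l.map (fun x => x + t)) (fun x => x)
      = (PySem.List.min? l (fun x => x)).map (fun x => x + t) := by
  cases l with
  | nil => rfl
  | cons x s =>
    rw [List.map_cons, PySem.List.min?_id_cons, PySem.List.min?_id_cons]
    simp only [Option.map_some]
    exact congrArg some (pv_foldlMinShift t s x)

theorem pv_minPerm (l l' : List Int) (h : l.Perm l') :
    PySem.List.min? l (fun x => x) = PySem.List.min? l' (fun x => x) := by
  cases hl : PySem.List.min? l (fun x => x) with
  | none =>
    rw [PySem.List.min?_eq_none_iff] at hl
    subst hl
    have h2 : l' = [] := h.nil_eq.symm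
    subst h2
    rfl
  | some m =>
    cases hl' : PySem.List.min? l' (fun x => x) with
    | none =>
      rw [PySem.List.min?_eq_none_iff] at hl'
      subst hl'
      rw [h.eq_nil] at hl
      simp [PySem.List.min?] at hl
    | some m' =>
      have hm := PySem.List.min?_mem hl
      have hm' := PySem.List.min?_mem hl'
      have h1 := PySem.List.min?_isMin hl
      have h2 := PySem.List.min?_isMin hl'
      exact congrArg some (le_antisymm (h1 m' (h.mem_iff.mpr hm')) (h2 m (h.mem_iff.mp hm)))

theorem pvNormalize_def (pts : List (Int × Int)) :
    pvNormalize pts = PySem.List.sorted2 (pts.map (fun p =>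
      (p.1 - (PySem.List.min? (pts.map (fun q => q.1)) (fun x => x)).getD 0,
       p.2 - (PySem.List.min? (pts.map (fun q => q.2)) (fun x => x)).getD 0)))
      (fun p => p.1) (fun p => p.2) := rfl

-- normalization is invariant under permuting and translating the point set
theorem pv_normInv (X Y : List (Int × Int)) (t1 t2 : Int)
    (h : X.Perm (Y.map (fun p => (p.1 + t1, p.2 + t2)))) : pvNormalize X = pvNormalize Y := by
  have hfst : (X.map (fun p => p.1)).Perm ((Y.map (fun p => p.1)).map (fun x => x + t1)) := by
    simpa [List.map_map, Function.comp_def] using h.map (fun p : Int × Int => p.1)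
  have hsnd : (X.map (fun p => p.2)).Perm ((Y.map (fun p => p.2)).map (fun x => x + t2)) := by
    simpa [List.map_map, Function.comp_def] using h.map (fun p : Int × Int => p.2)
  have e1 : PySem.List.min? (X.map (fun p => p.1)) (fun x => x)
      = (PySem.List.min? (Y.map (fun p => p.1)) (fun x => x)).map (fun x => x + t1) := by
    rw [pv_minPerm _ _ hfst, pv_minShift]
  have e2 : PySem.List.min? (X.map (fun p => p.2)) (fun x => x)
      = (PySem.List.min? (Y.map (fun p => p.2)) (fun x => x)).map (fun x => x + t2) := by
    rw [pv_minPerm _ _ hsnd, pv_minShift]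
  cases Y with
  | nil =>
    have hX : X = [] := h.eq_nil
    subst hX; rfl
  | cons y ys =>
    obtain ⟨a, ha⟩ : ∃ a, PySem.List.min? ((y :: ys).map (fun q => q.1)) (fun x => x) = some a := by
      cases hm : PySem.List.min? ((y :: ys).map (fun q => q.1)) (fun x => x) with
      | none => rw [PySem.List.min?_eq_none_iff] at hm; simp at hm
      | some a => exact ⟨a, rfl⟩
    obtain ⟨b, hb⟩ : ∃ b, PySem.List.min? ((y :: ys).map (fun q => q.2)) (fun x => x) = some b := by
      cases hm : PySem.List.min? ((y :: ys).map (fun q => q.2)) (fun x => x) with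
      | none => rw [PySem.List.min?_eq_none_iff] at hm; simp at hm
      | some b => exact ⟨b, rfl⟩
    rw [pvNormalize_def, pvNormalize_def, e1, e2, ha, hb]
    simp only [Option.map_some, Option.getD_some]
    rw [pv_s2s, pv_s2s]
    apply PySem.List.sorted_eq_sorted_of_perm _ _ _ toLex.injective
    have hmm : ((y :: ys).map (fun p => (p.1 + t1, p.2 + t2))).map
        (fun p : Int × Int => (p.1 - (a + t1), p.2 - (b + t2)))
        = (y :: ys).map (fun p => (p.1 - a, p.2 - b)) := by
      rw [List.map_map]; congr 1; funext p
      simp only [Function.comp_def, Prod.mk.injEq]; omega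
    have hp := h.map (fun p : Int × Int => (p.1 - (a + t1), p.2 - (b + t2)))
    rw [hmm] at hp
    exact hp

theorem pv_normPerm (X Y : List (Int × Int)) (h : X.Perm Y) : pvNormalize X = pvNormalize Y := by
  apply pv_normInv X Y 0 0
  simpa using h

-- A's rotate_90cw is the 90° linear map followed by normalization
theorem pv_r90_norm (X : List (Int × Int)) :
    rotate_90cw X = pvNormalize (X.map (fun p => (p.2, -p.1))) := by
  cases X with
  | nil => rfl
  | cons x xs =>
    set M : Int := (PySem.List.max? ((x :: xs).map (fun p => p.1)) (fun v => v)).getD 0 with hM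
    have key : (x :: xs).map (fun p => (p.2, M - p.1))
        = ((x :: xs).map (fun p => (p.2, -p.1))).map (fun q => (q.1, q.2 + M)) := by
      rw [List.map_map]; congr 1; funext p
      show (p.2, M - p.1) = (p.2, -p.1 + M)
      rw [Prod.mk.injEq]
      exact ⟨rfl, by ring⟩
    show PySem.List.sorted2 (((x :: xs).map (fun p => (p.2, M - p.1))).map
        (fun p => (p.1 - (PySem.List.min? (((x :: xs).map (fun p => (p.2, M - p.1))).map (fun q => q.1)) (fun x => x)).getD 0,
                   p.2 - (PySem.List.min? (((x :: xs).map (fun p => (p.2, M - p.1))).map (fun q => q.2)) (fun x => x)).getD 0)))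
        (fun p => p.1) (fun p => p.2) = _
    rw [key, ← pvNormalize_def]
    apply pv_normInv _ _ 0 M
    apply List.Perm.of_eq
    congr 1; funext q
    show (q.1, q.2 + M) = (q.1 + 0, q.2 + M)
    rw [Prod.mk.injEq]
    exact ⟨by ring, rfl⟩

-- normalizing before rotating does not change the normalized rotation
theorem pv_norm_map_rot (W : List (Int × Int)) :
    pvNormalize ((pvNormalize W).map (fun p => (p.2, -p.1)))
      = pvNormalize (W.map (fun p => (p.2, -p.1))) := by
  apply pv_normInv _ _ (-((PySem.List.min? (W.map (fun q => q.2)) (fun x => x)).getD 0))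
    ((PySem.List.min? (W.map (fun q => q.1)) (fun x => x)).getD 0)
  have hperm : (pvNormalize W).Perm (W.map (fun p =>
      (p.1 - (PySem.List.min? (W.map (fun q => q.1)) (fun x => x)).getD 0,
       p.2 - (PySem.List.min? (W.map (fun q => q.2)) (fun x => x)).getD 0))) := by
    rw [pvNormalize_def]; exact PySem.List.sorted2_perm _ _ _ _
  have hp := hperm.map (fun p : Int × Int => (p.2, -p.1))
  refine hp.trans (List.Perm.of_eq ?_)
  rw [List.map_map, List.map_map]
  congr 1; funext p
  simp only [Function.comp_def, Prod.mk.injEq]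
  exact ⟨by ring, by ring⟩

theorem pv_unfoldA (cells : List (Int × Int)) :
    get_4_rotations cells =
      [PySem.List.sorted2 cells (fun p => p.1) (fun p => p.2),
       rotate_90cw (PySem.List.sorted2 cells (fun p => p.1) (fun p => p.2)),
       rotate_90cw (rotate_90cw (PySem.List.sorted2 cells (fun p => p.1) (fun p => p.2))),
       rotate_90cw (rotate_90cw (rotate_90cw (PySem.List.sorted2 cells (fun p => p.1) (fun p => p.2))))] := rfl

-- ===== VERDICT (by name: the statement is the Claim_ definition above) =====
theorem get_4_rotations_spec : Claim_equal_get_4_rotations := by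
  intro cells _ _
  unfold Spec_get_4_rotations
  rw [pv_unfoldA]
  have hperm : (PySem.List.sorted2 cells (fun p => p.1) (fun p => p.2)).Perm cells :=
    PySem.List.sorted2_perm _ _ _ _
  have h1 : rotate_90cw (PySem.List.sorted2 cells (fun p => p.1) (fun p => p.2))
      = pvNormalize (cells.map (fun p => (p.2, -p.1))) := by
    rw [pv_r90_norm]
    exact pv_normPerm _ _ (hperm.map _)
  have h2S : rotate_90cw (rotate_90cw (PySem.List.sorted2 cells (fun p => p.1) (fun p => p.2)))
      = pvNormalize ((PySem.List.sorted2 cells (fun p => p.1) (fun p => p.2)).map (fun p => (-p.1, -p.2))) := by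
    rw [pv_r90_norm (PySem.List.sorted2 cells (fun p => p.1) (fun p => p.2)), pv_r90_norm,
      pv_norm_map_rot, List.map_map]
    have hc : ((fun p : Int × Int => (p.2, -p.1)) ∘ (fun p : Int × Int => (p.2, -p.1)))
        = (fun p : Int × Int => (-p.1, -p.2)) := by
      funext p; simp
    rw [hc]
  have h2 : rotate_90cw (rotate_90cw (PySem.List.sorted2 cells (fun p => p.1) (fun p => p.2)))
      = pvNormalize (cells.map (fun p => (-p.1, -p.2))) := by
    rw [h2S]
    exact pv_normPerm _ _ (hperm.map _)
  have h3 : rotate_90cw (rotate_90cw (rotate_90cw (PySem.List.sorted2 cells (fun p => p.1) (fun p => p.2))))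
      = pvNormalize (cells.map (fun p => (-p.2, p.1))) := by
    rw [h2S, pv_r90_norm, pv_norm_map_rot, List.map_map]
    have hc : ((fun p : Int × Int => (p.2, -p.1)) ∘ (fun p : Int × Int => (-p.1, -p.2)))
        = (fun p : Int × Int => (-p.2, p.1)) := by
      funext p; simp
    rw [hc]
    exact pv_normPerm _ _ (hperm.map _)
  rw [h3, h2, h1]
  rfl
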